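-- pv_equiv track=rewrite | github.com/prochot/L5K-Tuner | L5KTuner/strings.py | split_outer_attrs
-- ===== SOURCE A (Python) =====
-- def split_outer_attrs(left: str) -> tuple[str, str]:
--     """
--     If `left` ends with a single, balanced '(...)' at top level, split and return (prefix, attrs_inside).
--     Else return (left, "").
--     """
--     s = left.rstrip()
--     idx_last = s.rfind(")")
--
--     # Remove everything after last ')'
--     if idx_last != -1:
--         s = s[:idx_last+1]
--
--     if not s.endswith(')'):
--         return left, ""
--     # find matching '(' for the last ')'
--     depth = 0
--     start = None
--     for i, ch in enumerate(s):
--         if ch == '(':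
--             if depth == 0:
--                 start = i
--             depth += 1
--         elif ch == ')':
--             depth -= 1
--     # balanced and attrs end at the very end?
--     if start is not None and depth == 0:
--         return s[:start].rstrip(), s[start+1:-1]
--     return left, ""
-- ===== SOURCE B (Python) =====
-- def split_outer_attrs(left: str) -> tuple[str, str]:
--     """
--     If `left` ends with a single, balanced '(...)' at top level, split and return (prefix, attrs_inside).
--     Else return (left, "").
--     """
--     s = left.rstrip()
--     j = s.rfind(")")
--     if j != -1:
--         s = s[:j+1]
--     if not s.endswith(")"):
--         return left, ""
--     # staged passes: per-char deltas, net balance, prefix sums, reverse search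
--     deltas = [(ch == "(") - (ch == ")") for ch in s]
--     if sum(deltas):
--         return left, ""
--     pre = [0]
--     for d in deltas:
--         pre.append(pre[-1] + d)
--     # the group opener is the last '(' whose prefix depth is 0
--     for k, (ch, p) in enumerate(zip(reversed(s), reversed(pre[:-1]))):
--         if ch == "(" and p == 0:
--             i = len(s) - 1 - k
--             return s[:i].rstrip(), s[i+1:-1]
--     return left, ""
-- ===== Notes on version B (the rewrite author's own statement) =====
-- stated objective: alternative
-- what changed: A finds the group opener and the balance in one stateful left-to-right scan (depth counter plus a remembered opener index); B instead works in staged passes: a per-character delta list, its sum for the net-balance test, an explicitly built prefix-sum list, and a reverse search over the zipped reversed string and reversed prefix sums for the last opening parenthesis at prefix depth 0.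
import Mathlib
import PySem

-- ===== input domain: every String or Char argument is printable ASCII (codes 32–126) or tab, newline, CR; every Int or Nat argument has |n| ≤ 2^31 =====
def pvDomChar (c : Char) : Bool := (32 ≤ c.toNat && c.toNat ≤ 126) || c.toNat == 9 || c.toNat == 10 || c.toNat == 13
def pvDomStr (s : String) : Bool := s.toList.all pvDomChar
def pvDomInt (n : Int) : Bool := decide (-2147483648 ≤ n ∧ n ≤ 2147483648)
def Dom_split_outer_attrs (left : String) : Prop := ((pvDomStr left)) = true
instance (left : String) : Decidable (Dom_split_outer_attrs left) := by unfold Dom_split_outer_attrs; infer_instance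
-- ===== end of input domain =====

-- B replaces A's single stateful left-to-right depth scan by staged passes — a per-char
-- delta list, its sum for the balance test, a prefix-sum list, and a reverse search for
-- the last '(' at prefix depth 0 (objective: alternative decomposition).

-- ===== PORT A =====
-- A's for-loop over enumerate(s): depth counter, `start` = last '(' seen at depth 0.
def aScan : List Char → Int → Option Nat → Nat → Int × Option Nat
  | [], depth, start, _ => (depth, start)
  | ch :: rest, depth, start, i =>
    if ch = '(' then
      aScan rest (depth + 1) (if depth = 0 then some i else start) (i + 1)
    else if ch = ')' then
      aScan rest (depth - 1) start (i + 1)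
    else
      aScan rest depth start (i + 1)

def split_outer_attrs (left : String) : String × String :=
  let s0 := PySem.Str.rstrip left
  let idx_last := PySem.Str.rfind s0 ")"
  let s := if idx_last ≠ -1 then PySem.Str.slice s0 none (some (idx_last + 1)) else s0
  if PySem.Str.endswith s ")" = false then (left, "")
  else
    let r := aScan s.toList 0 none 0
    match r.2 with
    | some start =>
        if r.1 = 0 then
          (PySem.Str.rstrip (PySem.Str.slice s none (some (start : Int))),
           PySem.Str.slice s (some ((start : Int) + 1)) (some (-1)))
        else (left, "")
    | none => (left, "")

-- ===== PORT B =====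
-- B's comprehension: per-character balance deltas (+1 for '(', -1 for ')', 0 otherwise).
def bVals (l : List Char) : List Int :=
  l.map (fun ch => (if ch = '(' then (1 : Int) else 0) - (if ch = ')' then 1 else 0))

-- B's append loop building the running prefix sums (tail of `pre`, after the leading 0).
def bPre (a : Int) : List Int → List Int
  | [] => []
  | d :: rest => (a + d) :: bPre (a + d) rest

-- B's for-loop over enumerate(zip(reversed(s), reversed(pre[:-1]))).
def bFindK : List (Char × Int) → Nat → Option Nat
  | [], _ => none
  | (ch, p) :: rest, k => if ch = '(' ∧ p = 0 then some k else bFindK rest (k + 1)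

def split_outer_attrs_alt (left : String) : String × String :=
  let s0 := PySem.Str.rstrip left
  let j := PySem.Str.rfind s0 ")"
  let s := if j ≠ -1 then PySem.Str.slice s0 none (some (j + 1)) else s0
  if PySem.Str.endswith s ")" = false then (left, "")
  else
    let deltas := bVals s.toList
    if deltas.sum ≠ 0 then (left, "")
    else
      let pre := (0 : Int) :: bPre 0 deltas
      match bFindK (s.toList.reverse.zip pre.dropLast.reverse) 0 with
      | some k =>
          let i := s.toList.length - 1 - k
          (PySem.Str.rstrip (PySem.Str.slice s none (some (i : Int))),
           PySem.Str.slice s (some ((i : Int) + 1)) (some (-1)))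
      | none => (left, "")

-- ===== PRECONDITION & SPEC =====
def Spec_split_outer_attrs (left : String) (out : String × String) : Prop := out = split_outer_attrs_alt left
instance (left : String) (out : String × String) : Decidable (Spec_split_outer_attrs left out) := by unfold Spec_split_outer_attrs; infer_instance

-- ===== CLAIM (what is proved, stated in full; the proofs are below) =====
def Claim_equal_split_outer_attrs : Prop := ∀ (left : String), Dom_split_outer_attrs left → Spec_split_outer_attrs left (split_outer_attrs left)

-- ===== LEMMAS AND PROOFS =====

theorem aScan_fst (l : List Char) : ∀ (d : Int) (st : Option Nat) (i : Nat),
    (aScan l d st i).1 = d + (bVals l).sum := by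
  induction l with
  | nil => intro d st i; simp [aScan, bVals]
  | cons c rest ih =>
    intro d st i
    simp only [aScan]
    by_cases h1 : c = '('
    · simp [h1, ih, bVals]; ring
    · by_cases h2 : c = ')'
      · simp [h2, ih, bVals]; ring
      · simp [h1, h2, ih, bVals]

theorem aScan_snd_lt (l : List Char) : ∀ (d : Int) (st : Option Nat) (i0 : Nat),
    (∀ j, st = some j → j < i0) → ∀ j, (aScan l d st i0).2 = some j → j < i0 + l.length := by
  induction l with
  | nil =>
    intro d st i0 hst j hj
    simp only [aScan] at hj
    have := hst j hj; omega
  | cons c rest ih =>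
    intro d st i0 hst j hj
    simp only [aScan] at hj
    by_cases h1 : c = '('
    · simp only [h1] at hj
      have := ih (d+1) (if d = 0 then some i0 else st) (i0+1) (by
        intro j' hj'
        by_cases hd : d = 0
        · simp [hd] at hj'; omega
        · simp [hd] at hj'; have := hst j' hj'; omega) j hj
      simp at this ⊢; omega
    · by_cases h2 : c = ')'
      all_goals {
        simp only [h1, h2, reduceIte] at hj <;>
        first
        | (have := ih _ st (i0+1) (fun j' hj' => by have := hst j' hj'; omega) j hj
           simp at this ⊢; omega) }

theorem aScan_append (l₁ l₂ : List Char) : ∀ (d : Int) (st : Option Nat) (i : Nat),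
    aScan (l₁ ++ l₂) d st i = aScan l₂ (aScan l₁ d st i).1 (aScan l₁ d st i).2 (i + l₁.length) := by
  induction l₁ with
  | nil => intro d st i; simp [aScan]
  | cons c rest ih =>
    intro d st i
    simp only [List.cons_append, aScan, List.length_cons]
    have harith : i + 1 + rest.length = i + (rest.length + 1) := by omega
    by_cases h1 : c = '(' <;> by_cases h2 : c = ')' <;>
      simp only [h1, h2, reduceIte, ih, harith] <;> simp

theorem bVals_append (t : List Char) (c : Char) :
    bVals (t ++ [c]) = bVals t ++ [(if c = '(' then (1 : Int) else 0) - (if c = ')' then 1 else 0)] := by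
  simp [bVals]

theorem bPre_append (v : List Int) : ∀ (a x : Int),
    bPre a (v ++ [x]) = bPre a v ++ [a + v.sum + x] := by
  induction v with
  | nil => intro a x; simp [bPre]
  | cons d r ih =>
    intro a x
    simp only [List.cons_append, bPre, ih, List.sum_cons]
    have h : a + d + r.sum + x = a + (d + r.sum) + x := by ring
    rw [h]

theorem bPre_rev (v : List Int) : ∀ (a : Int),
    (a :: bPre a v).reverse = (a + v.sum) :: ((a :: bPre a v).dropLast).reverse := by
  induction v with
  | nil => intro a; simp [bPre]
  | cons d r ih =>
    intro a
    have h := ih (a + d)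
    show (a :: (a + d) :: bPre (a + d) r).reverse = _
    rw [List.reverse_cons, h, List.sum_cons,
      show bPre a (d :: r) = (a + d) :: bPre (a + d) r from rfl,
      List.dropLast_cons₂, List.reverse_cons]
    exact congrArg (· :: _) (by ring)

/-- The reversed prefix-depth list B zips against `reversed(s)`. -/
def pfxRev (m : List Char) : List Int := ((0 : Int) :: bPre 0 (bVals m)).dropLast.reverse

theorem pfxRev_append (t : List Char) (c : Char) :
    pfxRev (t ++ [c]) = (bVals t).sum :: pfxRev t := by
  unfold pfxRev
  rw [bVals_append, bPre_append,
    show ((0 : Int) :: (bPre 0 (bVals t) ++ [0 + (bVals t).sum + ((if c = '(' then (1:Int) else 0) - (if c = ')' then 1 else 0))]))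
      = ((0 : Int) :: bPre 0 (bVals t)) ++ [0 + (bVals t).sum + ((if c = '(' then (1:Int) else 0) - (if c = ')' then 1 else 0))] by simp,
    List.dropLast_concat, bPre_rev]
  simp

theorem bFindK_key (m : List Char) : ∀ (k : Nat),
    bFindK (m.reverse.zip (pfxRev m)) k
      = ((aScan m 0 none 0).2).map (fun i => k + (m.length - 1 - i)) := by
  induction m using List.reverseRecOn with
  | nil => intro k; simp [bFindK, aScan, pfxRev, bVals, bPre]
  | append_singleton t c ih =>
    intro k
    have hbound : ∀ j, (aScan t 0 none 0).2 = some j → j < t.length := by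
      intro j hj
      have := aScan_snd_lt t 0 none 0 (by simp) j hj
      simpa using this
    have hA := aScan_append t [c] 0 none 0
    have hdt : (aScan t 0 none 0).1 = (bVals t).sum := by rw [aScan_fst]; ring
    rw [List.reverse_append, List.reverse_singleton, List.singleton_append,
      pfxRev_append, List.zip_cons_cons]
    simp only [bFindK]
    rw [hA]
    simp only [aScan, hdt]
    by_cases h1 : c = '('
    · simp only [h1, reduceIte]
      by_cases hd : (bVals t).sum = 0
      · rw [if_pos ⟨trivial, hd⟩, if_pos hd]
        simp only [Option.map_some, Option.some.injEq, List.length_append,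
          List.length_singleton]
        omega
      · rw [if_neg (by rintro ⟨-, h⟩; exact hd h), if_neg hd, ih (k + 1)]
        cases hst : (aScan t 0 none 0).2 with
        | none => simp
        | some j =>
          have hj := hbound j hst
          simp only [Option.map_some, List.length_append, List.length_singleton,
            Option.some.injEq]
          omega
    · have hcond : ¬(c = '(' ∧ (bVals t).sum = 0) := by rintro ⟨h, -⟩; exact h1 h
      rw [if_neg hcond, ih (k + 1)]
      cases hst : (aScan t 0 none 0).2 with
      | none => by_cases h2 : c = ')' <;> simp [h1, h2]
      | some j =>
        have hj := hbound j hst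
        by_cases h2 : c = ')' <;>
          simp only [h1, h2, Char.reduceEq, reduceIte, Option.map_some,
            List.length_append, List.length_singleton, Option.some.injEq] <;> omega

-- ===== VERDICT (by name: the statement is the Claim_ definition above) =====
theorem split_outer_attrs_spec : Claim_equal_split_outer_attrs := by
  intro left _
  unfold Spec_split_outer_attrs split_outer_attrs split_outer_attrs_alt
  dsimp only
  generalize (if PySem.Str.rfind (PySem.Str.rstrip left) ")" ≠ -1
      then PySem.Str.slice (PySem.Str.rstrip left) none
        (some (PySem.Str.rfind (PySem.Str.rstrip left) ")" + 1))
      else PySem.Str.rstrip left) = s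
  by_cases hE : PySem.Str.endswith s ")" = false
  · rw [if_pos hE, if_pos hE]
  · rw [if_neg hE, if_neg hE]
    have hfst : (aScan s.toList 0 none 0).1 = (bVals s.toList).sum := by
      rw [aScan_fst]; ring
    have hkey := bFindK_key s.toList 0
    by_cases hnet : (bVals s.toList).sum = 0
    · rw [if_neg (fun h => h hnet)]
      rw [show ((0 : Int) :: bPre 0 (bVals s.toList)).dropLast.reverse = pfxRev s.toList from rfl] at *
      cases hsnd : (aScan s.toList 0 none 0).2 with
      | none =>
        rw [hsnd] at hkey
        simp only [Option.map_none] at hkey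
        rw [hkey]
      | some st =>
        have hlt : st < s.toList.length := by
          simpa using aScan_snd_lt s.toList 0 none 0 (by simp) st hsnd
        rw [hsnd] at hkey
        dsimp only [Option.map_some] at hkey
        rw [hkey]
        dsimp only
        rw [hfst, if_pos hnet]
        have hi : s.toList.length - 1 - (0 + (s.toList.length - 1 - st)) = st := by omega
        rw [hi]
    · rw [if_pos hnet]
      cases hsnd : (aScan s.toList 0 none 0).2 with
      | none => rfl
      | some st =>
        dsimp only
        rw [hfst, if_neg hnet]
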